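-- pv_equiv track=rewrite | github.com/Zranshi/leetcode | my-code/828/main.py | uniqueLetterString
-- ===== SOURCE A (Python) =====
-- import collections
--
-- def uniqueLetterString(s: str) -> int:
--     idx = collections.defaultdict(list)
--     for i, v in enumerate(s):
--         idx[v].append(i)
--
--     res = 0
--     for arr in idx.values():
--         arr = [-1] + arr + [len(s)]
--         for i in range(1, len(arr) - 1):
--             res += (arr[i] - arr[i - 1]) * (arr[i + 1] - arr[i])
--     return res
-- ===== SOURCE B (Python) =====
-- def uniqueLetterString(s: str) -> int:
--     n = len(s)
--     last = {}
--     prev = []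
--     for i, c in enumerate(s):
--         prev.append(last.get(c, -1))
--         last[c] = i
--     after = {}
--     nxt_rev = []
--     for i in reversed(range(n)):
--         c = s[i]
--         nxt_rev.append(after.get(c, n))
--         after[c] = i
--     nxt = nxt_rev[::-1]
--     return sum((i - p) * (nx - i) for i, (p, nx) in enumerate(zip(prev, nxt)))
-- ===== Notes on version B (the rewrite author's own statement) =====
-- stated objective: alternative
-- what changed: A groups all occurrence indices per character into a dict of lists and sums telescoping products per character; B never groups: it computes previous/next same-character occurrence for every position in two linear dict passes and sums the per-position contribution (i-prev)*(next-i).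
import Mathlib
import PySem

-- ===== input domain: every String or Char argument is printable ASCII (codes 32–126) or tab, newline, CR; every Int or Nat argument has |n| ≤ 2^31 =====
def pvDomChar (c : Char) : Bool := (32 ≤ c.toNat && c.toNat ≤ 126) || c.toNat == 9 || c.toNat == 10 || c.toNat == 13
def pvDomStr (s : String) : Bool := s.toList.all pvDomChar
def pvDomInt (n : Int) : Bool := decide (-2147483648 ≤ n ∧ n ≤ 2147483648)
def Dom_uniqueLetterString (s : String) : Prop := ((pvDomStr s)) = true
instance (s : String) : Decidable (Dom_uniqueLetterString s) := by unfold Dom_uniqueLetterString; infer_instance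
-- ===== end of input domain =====

-- B replaces A's per-character grouping (dict of occurrence-index lists + telescoping sums)
-- by per-position previous/next-occurrence passes; equal cost, different decomposition.
-- ===== PORT A =====
-- literal port of A; list indices arr[i], arr[i-1], arr[i+1] are always in range, so pyGetD with
-- dummy default 0 is exact here
def uniqueLetterString (s : String) : Int :=
  let cl := s.toList
  let idx : PySem.Dict Char (List Int) :=
    (PySem.List.enumerate cl).foldl
      (fun d p => d.modify p.2 [] (fun a => a ++ [p.1])) PySem.Dict.empty
  (PySem.Dict.values idx).foldl (fun res arr =>
    let arr2 : List Int := [-1] ++ arr ++ [PySem.Str.len s]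
    (PySem.List.pyRange 1 (PySem.List.len arr2 - 1)).foldl
      (fun r i => r + (PySem.List.pyGetD arr2 i 0 - PySem.List.pyGetD arr2 (i-1) 0) *
                      (PySem.List.pyGetD arr2 (i+1) 0 - PySem.List.pyGetD arr2 i 0)) res) 0

-- ===== PORT B =====
-- port of Source B; s[i] in the backward loop has i in range, so pyGetD with dummy default ' ' is exact
def uniqueLetterString_alt (s : String) : Int :=
  let cl := s.toList
  let n : Int := PySem.Str.len s
  let fwd := (PySem.List.enumerate cl).foldl
      (fun (st : List Int × PySem.Dict Char Int) p =>
        (st.1 ++ [st.2.getD p.2 (-1)], st.2.insert p.2 p.1)) ([], PySem.Dict.empty)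
  let prev := fwd.1
  let bwd := ((PySem.List.pyRange 0 n).reverse).foldl
      (fun (st : List Int × PySem.Dict Char Int) i =>
        let c := PySem.List.pyGetD cl i ' '
        (st.1 ++ [st.2.getD c n], st.2.insert c i)) ([], PySem.Dict.empty)
  let nxt := bwd.1.reverse
  (PySem.List.enumerate (prev.zip nxt)).foldl
      (fun acc q => acc + (q.1 - q.2.1) * (q.2.2 - q.1)) 0

-- ===== PRECONDITION & SPEC =====
def Spec_uniqueLetterString (s : String) (out : Int) : Prop := out = uniqueLetterString_alt s
instance (s : String) (out : Int) : Decidable (Spec_uniqueLetterString s out) := by unfold Spec_uniqueLetterString; infer_instance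

-- ===== CLAIM =====
def Claim_equal_uniqueLetterString : Prop := ∀ (s : String), Dom_uniqueLetterString s → Spec_uniqueLetterString s (uniqueLetterString s)


-- ===== LEMMAS AND PROOFS =====

-- character at index j (all indices used are < l.length)
def chD (l : List Char) (j : Nat) : Char := l.getD j ' '
-- increasing list of indices at which c occurs in l
def occN (l : List Char) (c : Char) : List Nat :=
  (List.range l.length).filter (fun j => chD l j == c)
-- previous occurrence of c strictly before i (-1 if none)
def prevC (l : List Char) (c : Char) (i : Nat) : Int :=
  (((occN l c).filter (fun x => decide (x < i))).map Int.ofNat).getLastD (-1)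
-- next occurrence of c strictly after i (len l if none)
def nextC (l : List Char) (c : Char) (i : Nat) : Int :=
  (((occN l c).filter (fun x => decide (i < x))).map Int.ofNat).headD (l.length : Int)
-- contribution of index i: number of substrings in which s[i] is a unique character
def contrib (l : List Char) (i : Nat) : Int :=
  (Int.ofNat i - prevC l (chD l i) i) * (nextC l (chD l i) i - Int.ofNat i)

-- sum of products of consecutive gaps
def T : List Int → Int
  | x :: y :: z :: rest => (y - x) * (z - y) + T (y :: z :: rest)
  | _ => 0

lemma enum_eq {α : Type} (d : α) (l : List α) (st : Int) :
    PySem.List.enumerate l st = (List.range l.length).map (fun i => (st + Int.ofNat i, l.getD i d)) := by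
  induction l generalizing st with
  | nil => rfl
  | cons x t ih =>
      simp only [PySem.List.enumerate, List.length_cons, List.range_succ_eq_map, List.map_cons,
        List.map_map, ih (st + 1)]
      refine List.cons_eq_cons.mpr ⟨by simp, ?_⟩
      apply List.map_congr_left
      intro i _
      simp only [Function.comp, Nat.succ_eq_add_one, List.getD_cons_succ, Prod.mk.injEq]
      exact ⟨by simp only [Int.ofNat_eq_natCast]; push_cast; ring, trivial⟩

lemma mapGetD_range {α : Type} (d : α) (l : List α) :
    (List.range l.length).map (fun i => l.getD i d) = l := by
  apply List.ext_getElem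
  · simp
  · intro i h1 h2
    simp only [List.getElem_map, List.getElem_range]
    rw [List.getD_eq_getElem _ _ h2]

lemma filtLt (n k : Nat) : (List.range n).filter (fun x => decide (x < k)) = List.range (min k n) := by
  induction n with
  | zero => simp
  | succ m ih =>
      rw [List.range_succ, List.filter_append, ih]
      by_cases h : m < k
      · have h2 : min k (m+1) = min k m + 1 := by omega
        rw [h2, List.range_succ]
        simp [h]
        omega
      · have h2 : min k (m+1) = min k m := by omega
        simp [h, h2]

lemma filtGt (n k : Nat) : (List.range n).filter (fun x => decide (k < x)) = (List.range n).drop (k+1) := by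
  induction n with
  | zero => simp
  | succ m ih =>
      rw [List.range_succ, List.filter_append, ih, List.drop_append]
      by_cases h : k < m
      · simp [h, List.length_range]
      · have h1 : m ≤ k := by omega
        have h2 : (List.range m).drop (k+1) = [] := by
          apply List.drop_eq_nil_of_le; simp; omega
        simp [h, h2]
        omega

lemma pyRange_nil (a b : Int) (h : b ≤ a) : PySem.List.pyRange a b = [] := by
  simp [PySem.List.pyRange]
  omega

lemma pyRange_shift (a : Int) (k : Nat) :
    PySem.List.pyRange a (a + (k : Int)) = (List.range k).map (fun t => a + Int.ofNat t) := by
  induction k with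
  | zero => simp [PySem.List.pyRange]
  | succ m ih =>
      rw [show ((m+1 : Nat) : Int) = (m : Int) + 1 by push_cast; ring, ← add_assoc,
        PySem.List.pyRange_one_succ_right (by omega), ih, List.range_succ]
      simp [Int.ofNat_eq_natCast]

-- the value appended for key c after processing ps, starting from dict d
def lastVal (ps : List (Int × Char)) (d : PySem.Dict Char Int) (dflt : Int) (c : Char) : Int :=
  ((ps.filter (fun p => p.2 == c)).map Prod.fst).getLastD (d.getD c dflt)

lemma lastVal_cons (p : Int × Char) (ts : List (Int × Char)) (d : PySem.Dict Char Int) (dflt : Int) (c : Char) :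
    lastVal (p :: ts) d dflt c = lastVal ts (d.insert p.2 p.1) dflt c := by
  unfold lastVal
  rw [PySem.Dict.getD_insert]
  by_cases h : p.2 = c
  · rw [List.filter_cons_of_pos (by simp [h]), List.map_cons, List.getLastD_cons, if_pos h.symm]
  · rw [List.filter_cons_of_neg (by simp [h]), if_neg (fun hc => h hc.symm)]

-- the "append last.get(c, dflt); last[c] = i" loop, fully characterised
lemma fwd_fold (ps : List (Int × Char)) (acc : List Int) (d : PySem.Dict Char Int) (dflt : Int) :
    (ps.foldl (fun st p => (st.1 ++ [st.2.getD p.2 dflt], st.2.insert p.2 p.1)) (acc, d)).1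
    = acc ++ (List.range ps.length).map (fun k => lastVal (ps.take k) d dflt ((ps.getD k (0, ' ')).2)) := by
  induction ps generalizing acc d with
  | nil => simp
  | cons p rest ih =>
      rw [List.foldl_cons, ih, List.length_cons, List.range_succ_eq_map, List.map_cons,
        List.map_map, List.append_assoc, List.singleton_append]
      congr 2
      apply List.map_congr_left
      intro k _
      show lastVal (rest.take k) (d.insert p.2 p.1) dflt ((rest.getD k (0, ' ')).2)
        = lastVal ((p :: rest).take (k + 1)) d dflt (((p :: rest).getD (k + 1) (0, ' ')).2)
      rw [List.take_succ_cons, List.getD_cons_succ]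
      exact (lastVal_cons p (rest.take k) d dflt _).symm

lemma SN_eq_T (xs : List Int) :
    ((List.range (xs.length - 2)).map
      (fun t => (xs.getD (t+1) 0 - xs.getD t 0) * (xs.getD (t+2) 0 - xs.getD (t+1) 0))).sum = T xs := by
  induction xs with
  | nil => simp [T]
  | cons x ys ih =>
      cases ys with
      | nil => simp [T]
      | cons y zs =>
          cases zs with
          | nil => simp [T]
          | cons z rest =>
              have hlen : (x :: y :: z :: rest).length - 2 = rest.length + 1 := by simp
              rw [hlen, List.range_succ_eq_map, List.map_cons, List.sum_cons, List.map_map]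
              have hh : T (x :: y :: z :: rest) = (y - x) * (z - y) + T (y :: z :: rest) := rfl
              rw [hh, ← ih]
              congr 1

-- A's inner loop over arr computes the consecutive-gap product sum T
lemma tripleS (xs : List Int) :
    ((PySem.List.pyRange 1 ((xs.length : Int) - 1)).map
      (fun i => (PySem.List.pyGetD xs i 0 - PySem.List.pyGetD xs (i-1) 0) *
                (PySem.List.pyGetD xs (i+1) 0 - PySem.List.pyGetD xs i 0))).sum = T xs := by
  rcases xs with _ | ⟨x, _ | ⟨y, ys⟩⟩
  · rw [pyRange_nil _ _ (by simp)]; simp [T]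
  · rw [pyRange_nil _ _ (by simp)]; simp [T]
  · have hlen : ((x :: y :: ys).length : Int) - 1 = 1 + (((x :: y :: ys).length - 2 : Nat) : Int) := by
      simp
      ring
    rw [hlen, pyRange_shift, List.map_map, ← SN_eq_T]
    congr 1
    apply List.map_congr_left
    intro t _
    have e1 : (1 : Int) + Int.ofNat t = ((t + 1 : Nat) : Int) := by
      simp only [Int.ofNat_eq_natCast]; push_cast; ring
    have e2 : ((t + 1 : Nat) : Int) - 1 = ((t : Nat) : Int) := by push_cast; ring
    have e3 : ((t + 1 : Nat) : Int) + 1 = ((t + 2 : Nat) : Int) := by push_cast; ring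
    simp only [Function.comp, e1, e2, e3, PySem.List.pyGetD_natCast]

-- T over a sentinelled increasing list, as a sum of per-occurrence contributions
lemma Gsum (o : List Nat) (a N : Int) (h : o.Pairwise (· < ·)) (ha : ∀ j ∈ o, a < (j : Int)) :
    T (a :: o.map Int.ofNat ++ [N]) =
    (o.map (fun (j : Nat) => (Int.ofNat j - (((o.filter (fun x => decide (x < j))).map Int.ofNat).getLastD a)) *
                     ((((o.filter (fun x => decide (j < x))).map Int.ofNat).headD N) - Int.ofNat j))).sum := by
  induction o generalizing a with
  | nil => simp [T]
  | cons x xs ih =>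
      have hx : ∀ j ∈ xs, x < j := fun j hj => (List.pairwise_cons.mp h).1 j hj
      have hxs : xs.Pairwise (· < ·) := (List.pairwise_cons.mp h).2
      have hfl : (x :: xs).filter (fun t => decide (t < x)) = [] := by
        rw [List.filter_cons_of_neg (by simp)]
        apply List.filter_eq_nil_iff.mpr
        intro t ht
        have := hx t ht
        simp
        omega
      have hfg : (x :: xs).filter (fun t => decide (x < t)) = xs := by
        rw [List.filter_cons_of_neg (by simp)]
        apply List.filter_eq_self.mpr
        intro t ht
        simp [hx t ht]
      simp only [List.map_cons, List.sum_cons]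
      have htail : ∀ j ∈ xs,
          (Int.ofNat j - ((((x :: xs).filter (fun t => decide (t < j))).map Int.ofNat).getLastD a)) *
            (((((x :: xs).filter (fun t => decide (j < t))).map Int.ofNat).headD N) - Int.ofNat j)
          = (Int.ofNat j - (((xs.filter (fun t => decide (t < j))).map Int.ofNat).getLastD (Int.ofNat x))) *
            ((((xs.filter (fun t => decide (j < t))).map Int.ofNat).headD N) - Int.ofNat j) := by
        intro j hj
        have hxj := hx j hj
        rw [List.filter_cons_of_pos (by simpa using hxj),
            List.filter_cons_of_neg (by simp; omega),
            List.map_cons, List.getLastD_cons]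
      rw [List.map_congr_left htail, ← ih (Int.ofNat x) hxs (fun j hj => by
        simp only [Int.ofNat_eq_natCast]
        exact_mod_cast hx j hj)]
      rw [hfl, hfg]
      cases xs with
      | nil => simp [T]
      | cons y ys => simp [T]

lemma sum_bump (S : List Char) (hS : S.Nodup) (c : Char) (hc : c ∈ S) (F F' : Char → Int) (v : Int)
    (hne : ∀ e ∈ S, e ≠ c → F e = F' e) (hc2 : F c = v + F' c) :
    (S.map F).sum = v + (S.map F').sum := by
  induction S with
  | nil => simp at hc
  | cons e S' ih =>
      simp only [List.map_cons, List.sum_cons]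
      rcases List.mem_cons.mp hc with he | he
      · subst he
        have hnotin : c ∉ S' := (List.nodup_cons.mp hS).1
        have hmapeq : S'.map F = S'.map F' :=
          List.map_congr_left (fun e' he' =>
            hne e' (List.mem_cons_of_mem _ he') (fun h => hnotin (h ▸ he')))
        rw [hc2, hmapeq]
        ring
      · have hne' : e ≠ c := fun h => (List.nodup_cons.mp hS).1 (h ▸ he)
        rw [hne e (List.mem_cons_self) hne',
          ih (List.nodup_cons.mp hS).2 he (fun e' he' h' => hne e' (List.mem_cons_of_mem _ he') h')]
        ring

-- summing fibre-wise over the distinct keys equals summing over all indices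
lemma fiber_sum (g : Nat → Int) (k : Nat → Char) (S : List Char) (idxs : List Nat)
    (hS : S.Nodup) (hmem : ∀ i ∈ idxs, k i ∈ S) :
    (S.map (fun c => ((idxs.filter (fun i => k i == c)).map g).sum)).sum = (idxs.map g).sum := by
  induction idxs with
  | nil => simp
  | cons x rest ih =>
      have hkx : k x ∈ S := hmem x List.mem_cons_self
      have hrest : ∀ i ∈ rest, k i ∈ S := fun i hi => hmem i (List.mem_cons_of_mem _ hi)
      rw [List.map_cons, List.sum_cons, ← ih hrest]
      apply sum_bump S hS (k x) hkx _ _ (g x)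
      · intro e _ hne
        rw [List.filter_cons_of_neg (by simp; exact fun h => hne h.symm)]
      · rw [List.filter_cons_of_pos (by simp), List.map_cons, List.sum_cons]

lemma prevC_eq (l : List Char) (c : Char) (k : Nat) (hk : k ≤ l.length) :
    prevC l c k = (((List.range k).filter (fun i => chD l i == c)).map Int.ofNat).getLastD (-1) := by
  unfold prevC occN
  rw [List.filter_filter]
  have : (List.range k) = (List.range l.length).filter (fun x => decide (x < k)) := by
    rw [filtLt, Nat.min_eq_left hk]
  rw [this, List.filter_filter]
  congr 2
  apply List.filter_congr
  intro x _
  exact Bool.and_comm _ _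

lemma nextC_eq (l : List Char) (c : Char) (i : Nat) :
    nextC l c i = ((((List.range l.length).drop (i+1)).filter (fun j => chD l j == c)).map Int.ofNat).headD (l.length : Int) := by
  unfold nextC occN
  rw [List.filter_filter, ← filtGt, List.filter_filter]
  congr 2
  apply List.filter_congr
  intro x _
  exact Bool.and_comm _ _

lemma A_eq (s : String) :
    uniqueLetterString s = ((List.range s.toList.length).map (contrib s.toList)).sum := by
  simp only [uniqueLetterString, PySem.Str.len_eq]
  generalize s.toList = cl
  set N := cl.length with hN
  set ps : List (Int × Char) := (List.range N).map (fun i => (Int.ofNat i, cl.getD i ' ')) with hps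
  have henum : PySem.List.enumerate cl = ps := by
    rw [enum_eq ' ' cl 0]
    apply List.map_congr_left
    intro i _
    simp
  set S : List Char := PySem.Set.ofList cl with hS
  set idx : PySem.Dict Char (List Int) :=
    ps.foldl (fun d p => d.modify p.2 [] (fun a => a ++ [p.1])) PySem.Dict.empty with hidx
  have hgetD : ∀ c, idx.getD c [] = (occN cl c).map Int.ofNat := by
    intro c
    have hm := List.foldl_map (f := fun p : Int × Char => (p.2, p.1))
      (g := fun (d : PySem.Dict Char (List Int)) q => d.modify q.1 [] (fun a => a ++ [q.2]))
      (l := ps) (init := PySem.Dict.empty)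
    simp only at hm
    rw [hidx, ← hm, PySem.Dict.getD_foldl_modify_append]
    simp only [hps, List.map_map, List.filter_map]
    rfl
  have hnodup : idx.keys.Nodup := by
    rw [hidx]
    exact PySem.Dict.nodup_keys_foldl_modify_key ps (fun p => p.2) [] (fun _ p a => a ++ [p.1])
      PySem.Dict.empty (by simp [PySem.Dict.keys_empty])
  have hkeys : idx.keys = S := by
    rw [hidx]
    have hk := PySem.Dict.keys_foldl_modify_key ps (fun p => p.2) [] (fun _ p a => a ++ [p.1])
      PySem.Dict.empty
    simp only at hk
    rw [hk, PySem.Dict.keys_empty, hS, PySem.Set.ofList_eq_foldl]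
    show PySem.Set.update [] (ps.map (fun p => p.2)) = _
    rw [hps, List.map_map]
    have : ((fun p : Int × Char => p.2) ∘ fun i => (Int.ofNat i, cl.getD i ' ')) = fun i => cl.getD i ' ' := rfl
    rw [this, mapGetD_range]
    rfl
  have hvals : idx.values = S.map (fun c => (occN cl c).map Int.ofNat) := by
    rw [PySem.Dict.values_eq_map_keys idx hnodup [], hkeys]
    exact List.map_congr_left (fun c _ => hgetD c)
  have houter : ∀ (arr : List Int) (res : Int),
      (PySem.List.pyRange 1 (PySem.List.len ([-1] ++ arr ++ [(N:Int)]) - 1)).foldl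
        (fun r i => r + (PySem.List.pyGetD ([-1] ++ arr ++ [(N:Int)]) i 0 - PySem.List.pyGetD ([-1] ++ arr ++ [(N:Int)]) (i-1) 0) *
                        (PySem.List.pyGetD ([-1] ++ arr ++ [(N:Int)]) (i+1) 0 - PySem.List.pyGetD ([-1] ++ arr ++ [(N:Int)]) i 0)) res
      = res + T (-1 :: arr ++ [(N:Int)]) := by
    intro arr res
    rw [PySem.List.foldl_add]
    have hlen : PySem.List.len ([-1] ++ arr ++ [(N:Int)]) = ((([-1] ++ arr ++ [(N:Int)]).length : Nat) : Int) := rfl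
    rw [hlen, tripleS]
    rfl
  rw [henum, ← hidx]
  rw [PySem.List.foldl_congr_mem idx.values _ (fun res arr => res + T (-1 :: arr ++ [(N:Int)]))
    0 (fun res arr _ => houter arr res)]
  rw [PySem.List.foldl_add, zero_add, hvals, List.map_map]
  have hG : ∀ c ∈ S, T (-1 :: (occN cl c).map Int.ofNat ++ [(N:Int)]) = ((occN cl c).map (contrib cl)).sum := by
    intro c _
    rw [Gsum (occN cl c) (-1) (N:Int)
      (List.Pairwise.filter _ List.pairwise_lt_range)
      (fun j _ => lt_of_lt_of_le neg_one_lt_zero (Int.natCast_nonneg j))]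
    congr 1
    apply List.map_congr_left
    intro j hj
    have hcj : chD cl j = c := by
      have := (List.mem_filter.mp hj).2
      simpa using this
    rw [← hcj]
    rfl
  calc (S.map ((fun arr => T (-1 :: arr ++ [(N:Int)])) ∘ fun c => (occN cl c).map Int.ofNat)).sum
      = (S.map (fun c => ((occN cl c).map (contrib cl)).sum)).sum := by
        apply congrArg
        apply List.map_congr_left
        intro c hc
        exact hG c hc
    _ = ((List.range N).map (contrib cl)).sum := by
        apply fiber_sum (contrib cl) (chD cl) S (List.range N) (hS ▸ PySem.Set.nodup_ofList cl)
        intro i hi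
        have hiN : i < N := List.mem_range.mp hi
        rw [hS]
        apply (PySem.Set.mem_ofList cl _).mpr
        rw [chD, List.getD_eq_getElem cl ' ' hiN]
        exact List.getElem_mem _

lemma B_eq (s : String) :
    uniqueLetterString_alt s = ((List.range s.toList.length).map (contrib s.toList)).sum := by
  simp only [uniqueLetterString_alt, PySem.Str.len_eq]
  generalize s.toList = cl
  set ps : List (Int × Char) := (List.range cl.length).map (fun i => (Int.ofNat i, cl.getD i ' ')) with hps
  have henum : PySem.List.enumerate cl = ps := by
    rw [enum_eq ' ' cl 0]
    apply List.map_congr_left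
    intro i _
    simp
  have hlenps : ps.length = cl.length := by simp [hps]
  have hpselem : ∀ (k : Nat) (hk : k < cl.length), ps[k]'(by simpa [hlenps] using hk) = (Int.ofNat k, cl.getD k ' ') := by
    intro k hk
    simp [hps]
  have hrev : ∀ (M : Nat) (G : Nat → Int), ((List.range M).map G).reverse = (List.range M).map (fun k => G (M - 1 - k)) := by
    intro M G
    apply List.ext_getElem
    · simp
    intro i h1 h2
    simp [List.getElem_reverse]
  rw [henum]
  -- forward pass: prev[i] = prevC cl (chD cl i) i
  have hprev : (ps.foldl (fun (st : List Int × PySem.Dict Char Int) p =>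
        (st.1 ++ [st.2.getD p.2 (-1)], st.2.insert p.2 p.1)) ([], PySem.Dict.empty)).1
      = (List.range cl.length).map (fun i => prevC cl (chD cl i) i) := by
    rw [fwd_fold, List.nil_append, hlenps]
    apply List.map_congr_left
    intro k hk
    have hkN : k < cl.length := List.mem_range.mp hk
    rw [List.getD_eq_getElem ps (0, ' ') (by omega), hpselem k hkN]
    show lastVal (ps.take k) PySem.Dict.empty (-1) (chD cl k) = _
    unfold lastVal
    rw [PySem.Dict.getD_empty, hps, ← List.map_take, List.take_range, Nat.min_eq_left (le_of_lt hkN),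
      List.filter_map, List.map_map, prevC_eq cl (chD cl k) k (le_of_lt hkN)]
    rfl
  rw [hprev]
  -- backward pass: nxt[i] = nextC cl (chD cl i) i
  have hmapf := List.foldl_map (f := fun i : Int => (i, PySem.List.pyGetD cl i ' '))
    (g := fun (st : List Int × PySem.Dict Char Int) q =>
      (st.1 ++ [st.2.getD q.2 (cl.length : Int)], st.2.insert q.2 q.1))
    (l := (PySem.List.pyRange 0 (cl.length : Int)).reverse) (init := (([] : List Int), PySem.Dict.empty))
  simp only at hmapf
  rw [← hmapf, fwd_fold]
  have hqs : ((PySem.List.pyRange 0 (cl.length : Int)).reverse).map (fun i : Int => (i, PySem.List.pyGetD cl i ' ')) = ps.reverse := by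
    rw [PySem.List.pyRange_zero_natCast, ← List.map_reverse, List.map_map, hps, ← List.map_reverse]
    apply List.map_congr_left
    intro i _
    simp [Function.comp, PySem.List.pyGetD_natCast]
  rw [hqs, List.nil_append]
  have hrl : ps.reverse.length = cl.length := by simp [hlenps]
  have hrgd : ∀ j, j < cl.length → ps.reverse.getD j (0, ' ')
      = (Int.ofNat (cl.length - 1 - j), cl.getD (cl.length - 1 - j) ' ') := by
    intro j hj
    rw [List.getD_eq_getElem _ _ (by omega), List.getElem_reverse]
    have hidx : ps.length - 1 - j = cl.length - 1 - j := by omega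
    rw [getElem_congr rfl hidx (by omega), hpselem (cl.length - 1 - j) (by omega)]
  have hnxt : ((List.range ps.reverse.length).map (fun k =>
        lastVal (ps.reverse.take k) PySem.Dict.empty (cl.length : Int) ((ps.reverse.getD k (0, ' ')).2))).reverse
      = (List.range cl.length).map (fun i => nextC cl (chD cl i) i) := by
    rw [hrl, hrev]
    apply List.map_congr_left
    intro k hk
    have hkN : k < cl.length := List.mem_range.mp hk
    have hj : cl.length - 1 - k < cl.length := by omega
    rw [hrgd _ hj]
    have hback : cl.length - 1 - (cl.length - 1 - k) = k := by omega
    rw [hback]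
    have htk : ps.reverse.take (cl.length - 1 - k) = (ps.drop (k + 1)).reverse := by
      have harg : ps.length - (cl.length - 1 - k) = k + 1 := by omega
      rw [List.take_reverse, harg]
    rw [htk]
    show lastVal ((ps.drop (k + 1)).reverse) PySem.Dict.empty (cl.length : Int) (chD cl k) = _
    unfold lastVal
    rw [PySem.Dict.getD_empty, List.filter_reverse, List.map_reverse,
      List.getLastD_eq_getLast?, List.getLast?_reverse, ← List.headD_eq_head?]
    rw [hps, ← List.map_drop, List.filter_map, List.map_map, nextC_eq cl (chD cl k) k]
    rfl
  rw [hnxt]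
  -- final sum
  rw [List.zip_map']
  have henum2 : PySem.List.enumerate ((List.range cl.length).map
        (fun i => (prevC cl (chD cl i) i, nextC cl (chD cl i) i)))
      = (List.range cl.length).map (fun k => (Int.ofNat k, (prevC cl (chD cl k) k, nextC cl (chD cl k) k))) := by
    rw [enum_eq ((-1 : Int), (-1 : Int)) _ 0]
    simp only [List.length_map, List.length_range]
    apply List.map_congr_left
    intro k hk
    have hkN : k < cl.length := List.mem_range.mp hk
    rw [List.getD_eq_getElem _ _ (by simp [hkN]), List.getElem_map, List.getElem_range, zero_add]
  rw [henum2, PySem.List.foldl_add, zero_add, List.map_map]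
  apply congrArg
  apply List.map_congr_left
  intro k _
  rfl

-- ===== VERDICT =====
theorem uniqueLetterString_spec : Claim_equal_uniqueLetterString := by
  intro s _
  unfold Spec_uniqueLetterString
  rw [A_eq, B_eq]
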